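-- pv_equiv track=rewrite | github.com/sdivyanshu90/LeetCode-Solutions | easy/decrypt.py | decrypt
-- ===== SOURCE A (Python) =====
-- from typing import List
--
-- def decrypt(code: List[int], k: int) -> List[int]:
--     result = [0 for _ in range(len(code))]
--     if k == 0:
--         return result
--
--     start, end, window_sum = 1, k, 0
--
--     if k < 0:
--         start = len(code) - abs(k)
--         end = len(code) - 1
--     for i in range(start, end + 1):
--         window_sum += code[i]
--
--     for i in range(len(code)):
--         result[i] = window_sum
--         window_sum -= code[start % len(code)]
--         window_sum += code[(end + 1) % len(code)]
--         start += 1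
--         end += 1
--     return result
-- ===== SOURCE B (Python) =====
-- def decrypt(code, k):
--     n = len(code)
--     if k == 0:
--         return [0] * n
--     js = range(1, k + 1) if k > 0 else range(k, 0)
--     return [sum(code[(i + j) % n] for j in js) for i in range(n)]
-- ===== Notes on version B (the rewrite author's own statement) =====
-- stated objective: simpler
-- what changed: B computes each output element independently as a direct sum of k modular-indexed neighbours (a nested comprehension), instead of A's sliding-window running sum with manual start/end pointers.
import Mathlib
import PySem

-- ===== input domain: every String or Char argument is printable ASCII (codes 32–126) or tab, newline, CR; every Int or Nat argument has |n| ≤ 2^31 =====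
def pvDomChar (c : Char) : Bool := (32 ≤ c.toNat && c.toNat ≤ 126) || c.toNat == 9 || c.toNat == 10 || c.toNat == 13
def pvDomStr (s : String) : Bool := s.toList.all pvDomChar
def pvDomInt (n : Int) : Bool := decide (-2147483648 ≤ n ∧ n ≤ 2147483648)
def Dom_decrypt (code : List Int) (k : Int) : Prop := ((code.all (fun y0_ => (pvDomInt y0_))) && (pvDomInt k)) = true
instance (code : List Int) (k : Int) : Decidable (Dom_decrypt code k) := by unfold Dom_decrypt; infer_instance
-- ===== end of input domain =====

-- B replaces A's sliding-window running sum by a direct per-position modular sum (simpler); equivalence is about the return value.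

-- ===== PORT A =====
-- loop body of A's second for-loop: result[i] = window_sum; slide the window by one
def stepA (code : List Int) (n : Int) (st : List Int × Int × Int × Int) (i : Int) :
    List Int × Int × Int × Int :=
  (st.1.set i.toNat st.2.1,
   st.2.1 - (PySem.List.pyGet? code (PySem.Int.mod st.2.2.1 n)).getD 0
          + (PySem.List.pyGet? code (PySem.Int.mod (st.2.2.2 + 1) n)).getD 0,
   st.2.2.1 + 1, st.2.2.2 + 1)

def decrypt (code : List Int) (k : Int) : List Int :=
  let result : List Int := (List.range code.length).map (fun _ => (0 : Int))
  if k = 0 then result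
  else
    let n : Int := (code.length : Int)
    let start : Int := 1
    let «end» : Int := k
    let window_sum : Int := 0
    let se : Int × Int := if k < 0 then (n - |k|, n - 1) else (start, «end»)
    let window_sum : Int :=
      (PySem.List.pyRange se.1 (se.2 + 1) 1).foldl
        (fun ws i => ws + (PySem.List.pyGet? code i).getD 0) window_sum
    let final := (PySem.List.pyRange 0 n 1).foldl (stepA code n) (result, window_sum, se.1, se.2)
    final.1

-- ===== PORT B =====
def decrypt_alt (code : List Int) (k : Int) : List Int :=
  let n := code.length
  if k = 0 then List.replicate n (0 : Int)
  else
    let js : List Int := if 0 < k then PySem.List.pyRange 1 (k + 1) 1 else PySem.List.pyRange k 0 1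
    (PySem.List.pyRange 0 (n : Int) 1).map
      (fun i => (js.map (fun j =>
        (PySem.List.pyGet? code (PySem.Int.mod (i + j) (n : Int))).getD 0)).sum)

-- ===== PRECONDITION & SPEC =====
-- Pre_ is exactly the set of inputs where the Python A returns normally: outside it A raises
-- IndexError (k ≥ n, k < -2n with n > 0) or IndexError/ZeroDivisionError (n = 0 with k ≠ 0).
def Pre_decrypt (code : List Int) (k : Int) : Prop :=
  k = 0 ∨ (0 < code.length ∧ k < (code.length : Int) ∧ -k ≤ 2 * (code.length : Int))
instance (code : List Int) (k : Int) : Decidable (Pre_decrypt code k) := by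
  unfold Pre_decrypt; infer_instance
def pvWitness_decrypt : List Int × Int := ([1, 2, 3], 1)

def Spec_decrypt (code : List Int) (k : Int) (out : List Int) : Prop := out = decrypt_alt code k
instance (code : List Int) (k : Int) (out : List Int) : Decidable (Spec_decrypt code k out) := by
  unfold Spec_decrypt; infer_instance

-- ===== CLAIM (what is proved, stated in full; the proofs are below) =====
def Claim_equal_decrypt : Prop := ∀ (code : List Int) (k : Int),
  Dom_decrypt code k → Pre_decrypt code k → Spec_decrypt code k (decrypt code k)
-- ===== LEMMAS AND PROOFS =====

-- proof-only helpers: the modular element access and the window sum over [a, b)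
def gv (code : List Int) (t : Int) : Int :=
  (PySem.List.pyGet? code (PySem.Int.mod t (code.length : Int))).getD 0

def Sv (code : List Int) (a b : Int) : Int :=
  ((PySem.List.pyRange a b 1).map (gv code)).sum

theorem gv_period (code : List Int) (t : Int) (hn : 0 < code.length) :
    gv code (t + (code.length : Int)) = gv code t := by
  unfold gv
  have h : PySem.Int.mod (t + (code.length : Int)) (code.length : Int)
      = PySem.Int.mod t (code.length : Int) := by
    rw [PySem.Int.mod_eq_emod_of_pos (by exact_mod_cast hn : (0:Int) < (code.length : Int)),
        PySem.Int.mod_eq_emod_of_pos (by exact_mod_cast hn : (0:Int) < (code.length : Int))]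
    rw [show t + (code.length:Int) = t + (code.length:Int) * 1 by ring, Int.add_mul_emod_self_left]
  rw [h]

theorem get_eq_gv (code : List Int) (i : Int) (hn : 0 < code.length)
    (h1 : -(code.length : Int) ≤ i) (h2 : i < (code.length : Int)) :
    (PySem.List.pyGet? code i).getD 0 = gv code i := by
  unfold gv
  by_cases h0 : 0 ≤ i
  · have : PySem.Int.mod i (code.length : Int) = i := by
      rw [PySem.Int.mod_eq_emod_of_pos (by exact_mod_cast hn : (0:Int) < (code.length : Int))]
      exact Int.emod_eq_of_lt h0 h2
    rw [this]
  · have hm : PySem.Int.mod i (code.length : Int) = i + (code.length : Int) := by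
      rw [PySem.Int.mod_eq_emod_of_pos (by exact_mod_cast hn : (0:Int) < (code.length : Int))]
      rw [show i % (code.length:Int) = (i + (code.length:Int) * 1) % (code.length:Int) by
            rw [Int.add_mul_emod_self_left]]
      rw [mul_one]
      exact Int.emod_eq_of_lt (by omega) (by omega)
    rw [hm]
    have hk : i = -(((-i).toNat : Nat) : Int) := by omega
    rw [hk, PySem.List.pyGet?_neg_natCast code ((-i).toNat) (by omega) (by omega)]
    have hnn : (0:Int) ≤ -(((-i).toNat : Nat) : Int) + (code.length : Int) := by omega
    rw [show PySem.List.pyGet? code (-(((-i).toNat : Nat) : Int) + (code.length : Int))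
          = code[(-(((-i).toNat : Nat) : Int) + (code.length : Int)).toNat]? from
        PySem.List.pyGet?_of_nonneg code hnn]
    have : (-(((-i).toNat : Nat) : Int) + (code.length : Int)).toNat
        = code.length - (-i).toNat := by omega
    rw [this]

theorem slide (code : List Int) (a b : Int) (h : a ≤ b) :
    Sv code (a + 1) (b + 1) = Sv code a b - gv code a + gv code b := by
  unfold Sv
  have h1 : PySem.List.pyRange a (b + 1) 1 = a :: PySem.List.pyRange (a + 1) (b + 1) 1 :=
    PySem.List.pyRange_one_cons (by omega)
  have h2 : PySem.List.pyRange a (b + 1) 1 = PySem.List.pyRange a b 1 ++ [b] :=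
    PySem.List.pyRange_one_succ_right h
  have := congrArg (fun l => ((l.map (gv code)).sum : Int)) (h1.symm.trans h2)
  simp at this
  omega

theorem shiftS (code : List Int) (a b i : Int) :
    ((PySem.List.pyRange a b 1).map (fun j => gv code (i + j))).sum = Sv code (a + i) (b + i) := by
  unfold Sv
  rw [PySem.List.pyRange_one a b, PySem.List.pyRange_one (a + i) (b + i)]
  have hd : b + i - (a + i) = b - a := by ring
  rw [hd, List.map_map, List.map_map]
  congr 1
  apply List.map_congr_left
  intro x _
  simp only [Function.comp_apply]
  congr 1
  ring

theorem SvN (code : List Int) (a b : Int) (hn : 0 < code.length) :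
    Sv code (a + (code.length : Int)) (b + (code.length : Int)) = Sv code a b := by
  rw [← shiftS]
  unfold Sv
  congr 1
  apply List.map_congr_left
  intro x _
  rw [show (code.length : Int) + x = x + (code.length : Int) by ring, gv_period _ _ hn]

theorem initsum (code : List Int) (s e : Int) (hn : 0 < code.length)
    (hs : -(code.length : Int) ≤ s) (he : e < (code.length : Int)) :
    (PySem.List.pyRange s (e + 1) 1).foldl
      (fun ws i => ws + (PySem.List.pyGet? code i).getD 0) 0 = Sv code s (e + 1) := by
  rw [PySem.List.foldl_add]
  unfold Sv
  rw [zero_add]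
  congr 1
  apply List.map_congr_left
  intro i hi
  have hb := (PySem.List.mem_pyRange_one).mp hi
  exact get_eq_gv code i hn (by omega) (by omega)

theorem take_set (l : List Int) (i : Nat) (w : Int) (h : i < l.length) :
    (l.set i w).take (i + 1) = l.take i ++ [w] := by
  induction l generalizing i with
  | nil => simp at h
  | cons x xs ih =>
    cases i with
    | zero => simp
    | succ j =>
      simp only [List.set_cons_succ, List.take_succ_cons]
      rw [ih j (by simpa using h)]
      simp

theorem loopA (code : List Int) (m : Nat) : ∀ (i0 : Nat) (res : List Int) (a b : Int),
    0 < code.length → a ≤ b → res.length = code.length → i0 + m = code.length →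
    ((PySem.List.pyRange (i0 : Int) (code.length : Int) 1).foldl
        (stepA code (code.length : Int)) (res, Sv code a (b + 1), a, b)).1
      = res.take i0 ++ (List.range m).map (fun t : Nat => Sv code (a + (t : Int)) (b + 1 + (t : Int))) := by
  induction m with
  | zero =>
    intro i0 res a b hn hab hlen hi
    rw [PySem.List.pyRange_one_eq_nil (by omega)]
    simp only [List.foldl_nil, List.range_zero, List.map_nil, List.append_nil]
    exact (List.take_of_length_le (by omega)).symm
  | succ m ih =>
    intro i0 res a b hn hab hlen hi
    rw [PySem.List.pyRange_one_cons (show (i0 : Int) < (code.length : Int) by exact_mod_cast (show i0 < code.length by omega))]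
    rw [List.foldl_cons]
    have hstep : stepA code (code.length : Int) (res, Sv code a (b + 1), a, b) (i0 : Int)
        = (res.set i0 (Sv code a (b + 1)), Sv code (a + 1) (b + 1 + 1), a + 1, b + 1) := by
      unfold stepA
      simp only
      have hws : Sv code a (b + 1) - gv code a + gv code (b + 1) = Sv code (a + 1) (b + 1 + 1) := by
        rw [slide code a (b + 1) (by omega)]
      rw [show ((i0 : Int)).toNat = i0 by omega]
      unfold gv at hws
      rw [← hws]
    rw [hstep]
    rw [show ((i0 : Int) + 1) = (((i0 + 1 : Nat)) : Int) by push_cast; ring]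
    rw [ih (i0 + 1) (res.set i0 (Sv code a (b + 1))) (a + 1) (b + 1) hn (by omega)
        (by simpa using hlen) (by omega)]
    rw [take_set _ _ _ (by omega), List.append_assoc]
    congr 1
    rw [List.range_succ_eq_map, List.map_cons, List.map_map]
    simp only [Nat.cast_zero, add_zero, List.singleton_append]
    congr 1
    apply List.map_congr_left
    intro t _
    simp only [Function.comp_apply]
    congr 1 <;> push_cast [Nat.succ_eq_add_one] <;> ring

theorem decrypt_eq (code : List Int) (k : Int) (hpre : Pre_decrypt code k) :
    decrypt code k = decrypt_alt code k := by
  unfold decrypt decrypt_alt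
  by_cases hk : k = 0
  · simp [hk, List.map_const']
  · simp only [if_neg hk]
    rcases hpre with h0 | ⟨hn, hkn, hk2n⟩
    · exact absurd h0 hk
    have hN : (0 : Int) < (code.length : Int) := by exact_mod_cast hn
    have hlen : ((List.range code.length).map (fun _ => (0 : Int))).length = code.length := by simp
    by_cases hneg : k < 0
    · -- k < 0 : start = n - |k| = n + k, end = n - 1
      have hse : (if k < 0 then ((code.length : Int) - |k|, (code.length : Int) - 1)
          else ((1 : Int), k)) = ((code.length : Int) + k, (code.length : Int) - 1) := by
        rw [if_pos hneg]; congr 1; rw [abs_of_neg hneg]; ring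
      simp only [hse]
      rw [show (code.length : Int) - 1 + 1 = (code.length : Int) by ring]
      rw [show (PySem.List.pyRange ((code.length : Int) + k) ((code.length : Int)) 1) =
          (PySem.List.pyRange ((code.length : Int) + k) (((code.length : Int) - 1) + 1) 1) by
            congr 1; ring]
      rw [initsum code ((code.length : Int) + k) ((code.length : Int) - 1) hn (by omega) (by omega)]
      rw [show (code.length : Int) - 1 + 1 = (code.length : Int) by ring]
      rw [show Sv code ((code.length : Int) + k) (code.length : Int)
          = Sv code ((code.length : Int) + k) (((code.length : Int) - 1) + 1) by congr 1; ring]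
      have hL := loopA code code.length 0 _ ((code.length : Int) + k) ((code.length : Int) - 1) hn
          (by omega) hlen (by omega)
      simp only [Nat.cast_zero] at hL
      rw [hL]
      rw [if_neg (by omega : ¬ 0 < k)]
      rw [List.take_zero, List.nil_append]
      rw [PySem.List.pyRange_one 0 (code.length : Int)]
      simp only [sub_zero, Int.toNat_natCast, List.map_map]
      apply List.map_congr_left
      intro t _
      simp only [Function.comp_apply, zero_add]
      have : ((PySem.List.pyRange k 0 1).map (fun j =>
          (PySem.List.pyGet? code (PySem.Int.mod ((t : Int) + j) (code.length : Int))).getD 0)).sum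
          = Sv code (k + (t : Int)) (0 + (t : Int)) := shiftS code k 0 (t : Int)
      rw [this]
      have h1 : (code.length : Int) + k + (t : Int) = (k + (t : Int)) + (code.length : Int) := by ring
      have h2 : (code.length : Int) - 1 + 1 + (t : Int) = (0 + (t : Int)) + (code.length : Int) := by ring
      rw [h1, h2, SvN code _ _ hn]
    · -- k > 0 : start = 1, end = k
      have hkpos : 0 < k := by omega
      have hse : (if k < 0 then ((code.length : Int) - |k|, (code.length : Int) - 1)
          else ((1 : Int), k)) = ((1 : Int), k) := by rw [if_neg hneg]
      simp only [hse]
      rw [initsum code 1 k hn (by omega) (by omega)]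
      have hL := loopA code code.length 0 _ 1 k hn (by omega) hlen (by omega)
      simp only [Nat.cast_zero] at hL
      rw [hL]
      rw [if_pos hkpos]
      rw [List.take_zero, List.nil_append]
      rw [PySem.List.pyRange_one 0 (code.length : Int)]
      simp only [sub_zero, Int.toNat_natCast, List.map_map]
      apply List.map_congr_left
      intro t _
      simp only [Function.comp_apply, zero_add]
      have : ((PySem.List.pyRange 1 (k + 1) 1).map (fun j =>
          (PySem.List.pyGet? code (PySem.Int.mod ((t : Int) + j) (code.length : Int))).getD 0)).sum
          = Sv code (1 + (t : Int)) ((k + 1) + (t : Int)) := shiftS code 1 (k + 1) (t : Int)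
      rw [this]

-- ===== VERDICT (by name: the statement is the Claim_ definition above) =====
theorem decrypt_spec : Claim_equal_decrypt := by
  intro code k _ hpre
  unfold Spec_decrypt
  exact decrypt_eq code k hpre
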